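-- pv_equiv track=rewrite | github.com/daniel-reich/ubiquitous-fiesta | epMcaSNzBFSF5uB89_15.py | currently_winning
-- ===== SOURCE A (Python) =====
-- def currently_winning(scores):
--   y =0
--   o =0
--   res =[]
--   for i in range(0,len(scores),2):
--     y+= scores[i]
--     o+= scores[i+1]
--     res.append('Y' if y>o else 'O' if y<o else 'T')
--   return res
-- ===== SOURCE B (Python) =====
-- def currently_winning(scores):
--     # Whole-list pipeline: alternate-sign transform of every score, prefix sums
--     # of that single stream, then keep a sign label at each odd position
--     # (the end of a round).  No pairing and no two-accumulator loop.
--     signed = [v if i % 2 == 0 else -v for i, v in enumerate(scores)]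
--     prefix = []
--     t = 0
--     for v in signed:
--         t += v
--         prefix.append(t)
--     return ['Y' if d > 0 else 'O' if d < 0 else 'T'
--             for i, d in enumerate(prefix) if i % 2 == 1]
-- ===== Notes on version B (the rewrite author's own statement) =====
-- stated objective: alternative
-- what changed: A runs one stride-2 loop keeping both running totals y and o; B never pairs the scores: it sign-flips every odd-indexed score, takes prefix sums of that single stream, and reads the verdicts off the signs at the odd positions of the prefix-sum list.
import Mathlib
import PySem

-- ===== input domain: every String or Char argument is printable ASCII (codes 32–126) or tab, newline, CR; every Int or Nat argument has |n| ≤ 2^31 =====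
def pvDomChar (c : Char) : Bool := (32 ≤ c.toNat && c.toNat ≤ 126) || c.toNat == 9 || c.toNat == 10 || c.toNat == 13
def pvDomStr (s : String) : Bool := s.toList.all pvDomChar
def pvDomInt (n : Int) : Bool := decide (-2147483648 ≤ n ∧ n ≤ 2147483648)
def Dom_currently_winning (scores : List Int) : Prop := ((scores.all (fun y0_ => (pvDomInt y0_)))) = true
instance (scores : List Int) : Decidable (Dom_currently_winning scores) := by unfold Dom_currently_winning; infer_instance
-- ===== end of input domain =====

-- B replaces A's stride-2 two-accumulator loop by an unpaired pipeline: sign-flip the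
-- odd-indexed scores, prefix-sum the whole stream, keep the signs at odd positions
-- (alternative decomposition, same cost).

-- ===== PORT A =====
-- One fused loop: running totals y and o, appending the verdict each iteration.
def currently_winning (scores : List Int) : List String :=
  let st := (PySem.List.pyRange 0 (scores.length : Int) 2).foldl
    (fun (st : Int × Int × List String) i =>
      let y := st.1 + PySem.List.pyGetD scores i 0
      let o := st.2.1 + PySem.List.pyGetD scores (i + 1) 0
      (y, o, st.2.2 ++ [if o < y then "Y" else if y < o then "O" else "T"]))
    (0, 0, [])
  st.2.2

-- ===== PORT B =====
-- signed = [v if i % 2 == 0 else -v for i, v in enumerate(scores)]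
-- prefix = running sums of signed; result = signs at the odd positions of prefix
def currently_winning_alt (scores : List Int) : List String :=
  let signed := (PySem.List.enumerate scores 0).map
    (fun p => if p.1 % 2 == 0 then p.2 else -p.2)
  let pref := (signed.foldl
    (fun (st : Int × List Int) v => (st.1 + v, st.2 ++ [st.1 + v])) (0, [])).2
  ((PySem.List.enumerate pref 0).filter (fun p => p.1 % 2 == 1)).map
    (fun p => if 0 < p.2 then "Y" else if p.2 < 0 then "O" else "T")

-- ===== PRECONDITION & SPEC =====
-- Pre_ excludes odd-length input, on which Python A raises IndexError at scores[i+1].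
def Pre_currently_winning (scores : List Int) : Prop := scores.length % 2 = 0
instance (scores : List Int) : Decidable (Pre_currently_winning scores) := by
  unfold Pre_currently_winning; infer_instance
def pvWitness_currently_winning : List Int := [3, 1, 2, 2]
def Spec_currently_winning (scores : List Int) (out : List String) : Prop := out = currently_winning_alt scores
instance (scores : List Int) (out : List String) : Decidable (Spec_currently_winning scores out) := by unfold Spec_currently_winning; infer_instance

-- ===== CLAIM (what is proved, stated in full; the proofs are below) =====
def Claim_equal_currently_winning : Prop := ∀ (scores : List Int), Dom_currently_winning scores → Pre_currently_winning scores → Spec_currently_winning scores (currently_winning scores)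

-- ===== LEMMAS AND PROOFS =====

-- the common semantic core: running differences per pair, then sign labels
def cwPairs (scores : List Int) : List (Int × Int) :=
  (PySem.List.pyRange 0 (scores.length : Int) 2).map
    (fun i => (PySem.List.pyGetD scores i 0, PySem.List.pyGetD scores (i + 1) 0))

def cwDiffs : List (Int × Int) → Int → List Int
  | [], _ => []
  | (a, b) :: rest, d => (d + (a - b)) :: cwDiffs rest (d + (a - b))

def cwSign (d : Int) : String := if 0 < d then "Y" else if d < 0 then "O" else "T"

-- A's loop body (proof-side name for the lambda in the port)
def cwStepA (scores : List Int) (st : Int × Int × List String) (i : Int) :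
    Int × Int × List String :=
  let y := st.1 + PySem.List.pyGetD scores i 0
  let o := st.2.1 + PySem.List.pyGetD scores (i + 1) 0
  (y, o, st.2.2 ++ [if o < y then "Y" else if y < o then "O" else "T"])

theorem cw_A_eq (scores : List Int) :
    currently_winning scores
      = ((PySem.List.pyRange 0 (scores.length : Int) 2).foldl
          (cwStepA scores) (0, 0, [])).2.2 := rfl

-- range(0, n+2, 2) peels its head 0, shifting the rest by 2.
theorem cw_range2_cons (n : Nat) :
    PySem.List.pyRange 0 ((n : Int) + 2) 2
      = 0 :: (PySem.List.pyRange 0 (n : Int) 2).map (· + 2) := by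
  rw [PySem.List.pyRange_of_pos _ _ (by norm_num),
      PySem.List.pyRange_of_pos _ _ (by norm_num)]
  have h1 : (0 : Int) < (n : Int) + 2 := by positivity
  rw [if_pos h1]
  by_cases hn : (0 : Int) < (n : Int)
  · rw [if_pos hn]
    have hcount : (((n : Int) + 2 - 0 + 2 - 1) / 2).toNat
        = (((n : Int) - 0 + 2 - 1) / 2).toNat + 1 := by omega
    rw [hcount, List.range_succ_eq_map]
    simp [List.map_map, Function.comp]
    intro k _
    ring
  · rw [if_neg hn]
    have hn0 : (n : Int) = 0 := by omega
    rw [hn0]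
    decide

-- indexing past a two-element prefix
theorem cw_getD_shift (x y : Int) (xs : List Int) (i : Int) (hi : 0 ≤ i) :
    PySem.List.pyGetD (x :: y :: xs) (i + 2) 0 = PySem.List.pyGetD xs i 0 := by
  rw [PySem.List.pyGetD_of_nonneg _ _ (by omega),
      PySem.List.pyGetD_of_nonneg _ _ hi]
  have h2 : (i + 2).toNat = i.toNat + 2 := by omega
  rw [h2]
  rfl

theorem cw_pairs_cons (a b : Int) (rest : List Int) :
    cwPairs (a :: b :: rest) = (a, b) :: cwPairs rest := by
  unfold cwPairs
  have hlen : ((a :: b :: rest).length : Int) = (rest.length : Int) + 2 := by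
    simp; omega
  rw [hlen, cw_range2_cons]
  simp only [List.map_cons, List.map_map]
  congr 1
  · rw [PySem.List.pyGetD_zero_cons,
        (by norm_num : (0 : Int) + 1 = 1), PySem.List.pyGetD_ofNat' _ 1]
    rfl
  · apply List.map_congr_left
    intro i hi
    have h0 : 0 ≤ i := by
      have := (PySem.List.mem_pyRange_iff_of_pos (by norm_num : (0:Int) < 2) i).mp hi
      omega
    simp only [Function.comp_apply]
    rw [cw_getD_shift _ _ _ _ h0,
        (by ring : i + 2 + 1 = (i + 1) + 2), cw_getD_shift _ _ _ _ (by omega)]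

-- A's fold over the shifted indices is the fold over the tail list
theorem cw_fold_shift (a b : Int) (rest : List Int) (r : List Int)
    (hr : ∀ i ∈ r, 0 ≤ i) :
    ∀ (st : Int × Int × List String),
    (r.map (· + 2)).foldl (cwStepA (a :: b :: rest)) st
      = r.foldl (cwStepA rest) st := by
  induction r with
  | nil => intro st; rfl
  | cons i r ih =>
    intro st
    have h0 : 0 ≤ i := hr i (List.mem_cons_self ..)
    simp only [List.map_cons, List.foldl_cons]
    rw [show cwStepA (a :: b :: rest) st (i + 2) = cwStepA rest st i from ?_,
        ih (fun j hj => hr j (List.mem_cons_of_mem _ hj))]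
    unfold cwStepA
    rw [cw_getD_shift _ _ _ _ h0,
        (by ring : i + 2 + 1 = (i + 1) + 2), cw_getD_shift _ _ _ _ (by omega)]

-- the two verdict spellings agree: A compares totals, B the sign of their difference
theorem cw_sign_eq (y o : Int) :
    (if o < y then "Y" else if y < o then "O" else "T") = cwSign (y - o) := by
  unfold cwSign; split_ifs <;> first | rfl | omega

-- main invariant for A: from any state, A's fold appends the sign-mapped running diffs
theorem cw_main (n : Nat) : ∀ (scores : List Int), scores.length = n →
    ∀ (y o : Int) (acc : List String),
    ((PySem.List.pyRange 0 (scores.length : Int) 2).foldl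
        (cwStepA scores) (y, o, acc)).2.2
      = acc ++ (cwDiffs (cwPairs scores) (y - o)).map cwSign := by
  induction n using Nat.strong_induction_on with
  | _ n ih =>
    intro scores hlen y o acc
    match scores with
    | [] => simp [cwPairs, PySem.List.pyRange, cwDiffs]
    | [a] =>
      rw [show (([a].length : Int)) = 1 by rfl,
          show PySem.List.pyRange 0 1 2 = [0] by decide]
      unfold cwPairs
      rw [show (([a].length : Int)) = 1 by rfl,
          show PySem.List.pyRange 0 1 2 = [0] by decide]
      simp only [List.foldl_cons, List.foldl_nil, List.map_cons, List.map_nil]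
      unfold cwStepA cwDiffs cwDiffs
      rw [PySem.List.pyGetD_zero_cons,
          (by norm_num : (0 : Int) + 1 = 1), PySem.List.pyGetD_ofNat' _ 1]
      simp [cw_sign_eq]
      congr 1
      omega
    | a :: b :: rest =>
      have hlt : rest.length < n := by simp at hlen; omega
      have hlen2 : ((a :: b :: rest).length : Int) = (rest.length : Int) + 2 := by
        simp; omega
      rw [hlen2, cw_range2_cons]
      simp only [List.foldl_cons]
      rw [cw_fold_shift a b rest _
            (fun i hi => by
              have := (PySem.List.mem_pyRange_iff_of_pos
                (by norm_num : (0:Int) < 2) i).mp hi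
              omega)]
      rw [show cwStepA (a :: b :: rest) (y, o, acc) 0
            = (y + a, o + b,
               acc ++ [if o + b < y + a then "Y"
                       else if y + a < o + b then "O" else "T"]) from ?_]
      · rw [ih rest.length hlt rest rfl, cw_sign_eq,
            (by ring : y + a - (o + b) = (y - o) + (a - b)), cw_pairs_cons]
        simp [cwDiffs]
      · unfold cwStepA
        rw [PySem.List.pyGetD_zero_cons,
            (by norm_num : (0 : Int) + 1 = 1), PySem.List.pyGetD_ofNat' _ 1]
        rfl

-- ---------- B-side lemmas ----------

-- enumerate from a start shifted by 2 just shifts every index by 2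
theorem cw_enum_shift {α : Type} (xs : List α) : ∀ (s : Int),
    PySem.List.enumerate xs (s + 2)
      = (PySem.List.enumerate xs s).map (fun p => (p.1 + 2, p.2)) := by
  induction xs with
  | nil => intro s; simp [PySem.List.enumerate_nil]
  | cons x xs ih =>
    intro s
    rw [PySem.List.enumerate_cons, PySem.List.enumerate_cons]
    simp only [List.map_cons]
    rw [(by ring : s + 2 + 1 = (s + 1) + 2), ih (s + 1)]

-- proof-side names for B's three stages
def cwSignedOf (scores : List Int) : List Int :=
  (PySem.List.enumerate scores 0).map (fun p => if p.1 % 2 == 0 then p.2 else -p.2)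

def cwPref : List Int → Int → List Int
  | [], _ => []
  | v :: vs, t => (t + v) :: cwPref vs (t + v)

def cwOddSigns (xs : List Int) : List String :=
  ((PySem.List.enumerate xs 0).filter (fun p => p.1 % 2 == 1)).map (fun p => cwSign p.2)

theorem cw_B_eq (scores : List Int) :
    currently_winning_alt scores
      = cwOddSigns ((cwSignedOf scores).foldl
          (fun (st : Int × List Int) v => (st.1 + v, st.2 ++ [st.1 + v])) (0, [])).2 := by
  unfold currently_winning_alt cwOddSigns cwSignedOf cwSign
  rfl

-- the prefix fold is cwPref (with an accumulator append)
theorem cw_pref_fold : ∀ (xs : List Int) (t : Int) (acc : List Int),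
    (xs.foldl (fun (st : Int × List Int) v => (st.1 + v, st.2 ++ [st.1 + v])) (t, acc))
      = (t + xs.sum, acc ++ cwPref xs t) := by
  intro xs
  induction xs with
  | nil => intro t acc; simp [cwPref]
  | cons v vs ih =>
    intro t acc
    simp only [List.foldl_cons, ih (t + v) (acc ++ [t + v]), cwPref, List.sum_cons]
    rw [Prod.mk.injEq]
    exact ⟨by ring, by simp⟩

-- parity of the index is all the signed map looks at
theorem cw_signed_cons (a b : Int) (rest : List Int) :
    cwSignedOf (a :: b :: rest) = a :: -b :: cwSignedOf rest := by
  unfold cwSignedOf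
  rw [PySem.List.enumerate_cons, PySem.List.enumerate_cons,
      (by norm_num : (0 : Int) + 1 + 1 = 0 + 2), cw_enum_shift rest 0]
  simp only [List.map_cons, List.map_map]
  refine congrArg₂ _ (by norm_num) (congrArg₂ _ (by norm_num) ?_)
  apply List.map_congr_left
  intro p _
  simp only [Function.comp_apply]
  have : (p.1 + 2) % 2 = p.1 % 2 := by omega
  rw [this]

theorem cw_oddSigns_cons (p q : Int) (ps : List Int) :
    cwOddSigns (p :: q :: ps) = cwSign q :: cwOddSigns ps := by
  unfold cwOddSigns
  rw [PySem.List.enumerate_cons, PySem.List.enumerate_cons,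
      (by norm_num : (0 : Int) + 1 + 1 = 0 + 2), cw_enum_shift ps 0]
  simp only [List.filter_cons]
  norm_num
  rw [List.filter_map]
  have hpred : ((fun (x : Int × Int) => x.1 % 2 == 1) ∘ fun p => (p.1 + 2, p.2))
      = (fun (x : Int × Int) => x.1 % 2 == 1) := by
    funext x
    simp only [Function.comp_apply]
    have : (x.1 + 2) % 2 = x.1 % 2 := by omega
    rw [this]
  rw [hpred, List.map_map]
  rfl

-- B's pipeline computes the sign-mapped running diffs of the pairs
theorem cw_B_main (n : Nat) : ∀ (scores : List Int), scores.length = n →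
    scores.length % 2 = 0 → ∀ (t : Int),
    cwOddSigns (cwPref (cwSignedOf scores) t) = (cwDiffs (cwPairs scores) t).map cwSign := by
  induction n using Nat.strong_induction_on with
  | _ n ih =>
    intro scores hlen heven t
    match scores with
    | [] => rfl
    | [a] => simp at heven
    | a :: b :: rest =>
      have hlt : rest.length < n := by simp at hlen; omega
      have hre : rest.length % 2 = 0 := by simp at heven; omega
      rw [cw_signed_cons, cw_pairs_cons]
      show cwOddSigns ((t + a) :: (t + a + -b) :: cwPref (cwSignedOf rest) (t + a + -b))
        = _
      rw [cw_oddSigns_cons, ih rest.length hlt rest rfl hre]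
      show _ = cwSign (t + (a - b)) :: (cwDiffs (cwPairs rest) (t + (a - b))).map cwSign
      rw [(by ring : t + a + -b = t + (a - b))]

-- ===== VERDICT (by name: the statement is the Claim_ definition above) =====
theorem currently_winning_spec : Claim_equal_currently_winning := by
  intro scores _ hpre
  unfold Spec_currently_winning
  rw [cw_A_eq, cw_main scores.length scores rfl 0 0 [], cw_B_eq, cw_pref_fold]
  simp only [List.nil_append]
  rw [cw_B_main scores.length scores rfl hpre 0]
  norm_num
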